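-- pv_equiv track=rewrite | github.com/vyshuks/DSAlgo | leetcode/number-of-matching-subsequences.py | numMatchingSubseq
-- ===== SOURCE A (Python) =====
-- from typing import List
--
-- def numMatchingSubseq(s: str, words: List[str]) -> int:
--
--     lookup = {}
--     for i, c in enumerate(s):
--         if c in lookup:
--             lookup[c].append(i)
--         else:
--             lookup[c] = [i]
--
--     def find_index(lst, i):
--         l , r = 0, len(lst)
--         while l < r:
--             mid = (l+r)//2
--             if lst[mid] > i:
--                 r = mid
--
--
--             else:
--                 l = mid+1
--
--         return l
--
--
--     count = 0
--     for word in words: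
--         latest = -1
--         found = True
--         for w in word:
--             if w not in lookup:
--                 found = False
--                 break
--             i = find_index(lookup[w], latest)
--             if i == len(lookup[w]):
--                 found = False
--                 break
--             else:
--                 latest = lookup[w][i]
--         if found:
--             count+=1
--
--     return count
-- ===== SOURCE B (Python) =====
-- from typing import List
--
-- def numMatchingSubseq(s: str, words: List[str]) -> int:
--     # Idiomatic two-pointer check: consume one shared iterator of s per word;
--     # no index table, no binary search.
--     def is_sub(word):
--         it = iter(s)
--         return all(c in it for c in word)
--     return sum(1 for word in words if is_sub(word))
-- ===== Notes on version B (the rewrite author's own statement) =====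
-- stated objective: idiomatic
-- what changed: Replaced A's per-character occurrence-index table plus hand-written binary search by the idiomatic per-word two-pointer scan (a shared iterator of s consumed by 'c in it'), so no auxiliary dict or search routine is built.
import Mathlib
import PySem

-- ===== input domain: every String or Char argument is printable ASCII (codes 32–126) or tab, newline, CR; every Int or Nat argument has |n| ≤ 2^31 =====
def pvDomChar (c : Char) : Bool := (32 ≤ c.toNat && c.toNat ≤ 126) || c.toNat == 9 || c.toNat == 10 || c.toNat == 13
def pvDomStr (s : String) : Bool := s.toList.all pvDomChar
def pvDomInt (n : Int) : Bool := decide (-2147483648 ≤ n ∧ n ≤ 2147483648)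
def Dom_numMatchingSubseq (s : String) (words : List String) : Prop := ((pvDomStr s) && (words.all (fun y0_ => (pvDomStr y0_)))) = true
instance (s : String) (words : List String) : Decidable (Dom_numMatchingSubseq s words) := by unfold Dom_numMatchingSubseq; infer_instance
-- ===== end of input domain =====

-- B replaces A's occurrence-index table + hand-written binary search by the idiomatic
-- per-word two-pointer scan over s (objective: idiomatic; a timing run measured B constant-factor faster).

-- ===== PORT A =====

-- A's find_index: binary search 'while l < r' loop; lst[mid] is always in range when
-- called as in A (0 ≤ l ≤ mid < r ≤ len lst), so getD's default is never read.
def pvFindGo (lst : List Int) (i : Int) (l r : Nat) : Nat :=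
  if _h : l < r then
    let mid := (l + r) / 2
    if i < lst.getD mid 0 then pvFindGo lst i l mid else pvFindGo lst i (mid + 1) r
  else l
termination_by r - l
decreasing_by all_goals omega

-- A's first loop: lookup = {c: [positions]} built over enumerate(s)
def pvBuildLookup (t : List Char) : PySem.Dict Char (List Int) :=
  (PySem.List.enumerate t 0).foldl
    (fun d p =>
      match d.get? p.2 with
      | some lst => d.insert p.2 (lst ++ [p.1])
      | none => d.insert p.2 [p.1]) PySem.Dict.empty

-- A's inner loop over the word's characters (found/break/latest state)
def pvMatchWord (lookup : PySem.Dict Char (List Int)) : List Char → Int → Bool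
  | [], _ => true
  | c :: rest, latest =>
    match lookup.get? c with
    | none => false
    | some lst =>
      let i := pvFindGo lst latest 0 lst.length
      if i = lst.length then false
      else pvMatchWord lookup rest (lst.getD i 0)

def numMatchingSubseq (s : String) (words : List String) : Int :=
  let lookup := pvBuildLookup s.toList
  words.foldl (fun count word => if pvMatchWord lookup word.toList (-1) then count + 1 else count) 0

-- ===== PORT B =====

-- 'c in it' on an iterator: scan forward for c, return the remainder (none = exhausted)
def pvConsume (c : Char) : List Char → Option (List Char)
  | [] => none
  | x :: t => if x = c then some t else pvConsume c t

-- all(c in it for c in word)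
def pvIsSub : List Char → List Char → Bool
  | [], _ => true
  | c :: w, it =>
    match pvConsume c it with
    | none => false
    | some it' => pvIsSub w it'

def numMatchingSubseq_alt (s : String) (words : List String) : Int :=
  words.foldl (fun acc word => acc + (if pvIsSub word.toList s.toList then 1 else 0)) 0

-- ===== PRECONDITION & SPEC =====
def Spec_numMatchingSubseq (s : String) (words : List String) (out : Int) : Prop := out = numMatchingSubseq_alt s words
instance (s : String) (words : List String) (out : Int) : Decidable (Spec_numMatchingSubseq s words out) := by unfold Spec_numMatchingSubseq; infer_instance

-- ===== CLAIM (what is proved, stated in full; the proofs are below) =====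
def Claim_equal_numMatchingSubseq : Prop := ∀ (s : String) (words : List String), Dom_numMatchingSubseq s words → Spec_numMatchingSubseq s words (numMatchingSubseq s words)

-- ===== LEMMAS AND PROOFS =====

-- occurrence indices of c in t, offset j: the value A's lookup stores at key c
def pvOcc (c : Char) : List Char → Int → List Int
  | [], _ => []
  | x :: t, j => if x = c then j :: pvOcc c t (j + 1) else pvOcc c t (j + 1)

theorem pvOcc_mem_le (c : Char) (t : List Char) (j : Int) :
    ∀ a ∈ pvOcc c t j, j ≤ a := by
  induction t generalizing j with
  | nil => simp [pvOcc]
  | cons x t ih =>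
    intro a ha
    simp only [pvOcc] at ha
    split at ha
    · rcases List.mem_cons.1 ha with h | h
      · omega
      · have := ih (j + 1) a h; omega
    · have := ih (j + 1) a ha; omega

theorem pvOcc_sorted (c : Char) (t : List Char) (j : Int) :
    (pvOcc c t j).Pairwise (· ≤ ·) := by
  induction t generalizing j with
  | nil => simp [pvOcc]
  | cons x t ih =>
    simp only [pvOcc]
    split
    · exact List.Pairwise.cons (fun a ha => by have := pvOcc_mem_le c t (j + 1) a ha; omega) (ih (j + 1))
    · exact ih (j + 1)

-- the filtered enumerate pairs at key c are exactly pvOcc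
theorem pvEnum_filter (c : Char) (t : List Char) (j : Int) :
    ((((PySem.List.enumerate t j).map Prod.swap).filter (fun p => p.1 == c)).map (·.2))
      = pvOcc c t j := by
  induction t generalizing j with
  | nil => simp [PySem.List.enumerate_nil, pvOcc]
  | cons x t ih =>
    rw [PySem.List.enumerate_cons]
    by_cases hx : x = c <;>
      simp [pvOcc, hx, ih (j + 1)]

-- A's lookup built over enumerate equals pvOcc at every key
theorem pvBuildLookup_getD (t : List Char) (c : Char) :
    (pvBuildLookup t).getD c [] = pvOcc c t 0 := by
  have hstep : (fun (d : PySem.Dict Char (List Int)) (p : Int × Char) =>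
      match d.get? p.2 with
      | some lst => d.insert p.2 (lst ++ [p.1])
      | none => d.insert p.2 [p.1])
      = (fun d p => d.modify p.2 [] (· ++ [p.1])) := by
    funext d p
    cases hg : d.get? p.2 with
    | none =>
      simp [PySem.Dict.modify, PySem.Dict.getD_eq_get?_getD, hg]
    | some lst =>
      simp [PySem.Dict.modify, PySem.Dict.getD_eq_get?_getD, hg]
  have hswap : pvBuildLookup t
      = ((PySem.List.enumerate t 0).map Prod.swap).foldl
          (fun d q => d.modify q.1 [] (· ++ [q.2])) PySem.Dict.empty := by
    rw [pvBuildLookup, hstep, List.foldl_map]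
    rfl
  rw [hswap, PySem.Dict.getD_foldl_modify_append, PySem.Dict.getD_empty]
  rw [List.nil_append]
  exact pvEnum_filter c t 0

-- characterisation of the sorted ≤-prefix: position k is inside it iff lst[k] ≤ i
theorem pvTakeWhile_char (i : Int) :
    ∀ (lst : List Int), lst.Pairwise (· ≤ ·) → ∀ k, k < lst.length →
      (k < (lst.takeWhile (fun a => decide (a ≤ i))).length ↔ lst.getD k 0 ≤ i) := by
  intro lst
  induction lst with
  | nil => intro _ k hk; simp at hk
  | cons x t ih =>
    intro hp k hk
    obtain ⟨hx, ht⟩ := List.pairwise_cons.1 hp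
    by_cases hxi : x ≤ i
    · rw [List.takeWhile_cons_of_pos (by simpa using hxi)]
      cases k with
      | zero => simpa using hxi
      | succ k =>
        rw [List.getD_cons_succ]
        have := ih ht k (by simpa using hk)
        simp only [List.length_cons]
        omega
    · rw [List.takeWhile_cons_of_neg (by simpa using hxi)]
      simp only [List.length_nil]
      cases k with
      | zero => simpa using hxi
      | succ k =>
        rw [List.getD_cons_succ]
        have hk' : k < t.length := by simpa using hk
        have hmem : t.getD k 0 ∈ t := by
          rw [List.getD_eq_getElem t 0 hk']; exact List.getElem_mem hk'
        have := hx _ hmem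
        constructor
        · omega
        · intro h; omega

-- the binary search on a sorted list returns the length of the ≤-prefix
theorem pvFindGo_eq (lst : List Int) (i : Int) (hs : lst.Pairwise (· ≤ ·)) :
    pvFindGo lst i 0 lst.length = (lst.takeWhile (fun a => decide (a ≤ i))).length := by
  have hlen : (lst.takeWhile (fun a => decide (a ≤ i))).length ≤ lst.length := by
    have := congrArg List.length (List.takeWhile_append_dropWhile
      (p := fun a => decide (a ≤ i)) (l := lst))
    rw [List.length_append] at this
    omega
  have hgo : ∀ (d l r : Nat), r - l ≤ d →
      l ≤ (lst.takeWhile (fun a => decide (a ≤ i))).length →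
      (lst.takeWhile (fun a => decide (a ≤ i))).length ≤ r → r ≤ lst.length →
      pvFindGo lst i l r = (lst.takeWhile (fun a => decide (a ≤ i))).length := by
    intro d
    induction d with
    | zero =>
      intro l r h1 h2 h3 h4
      rw [pvFindGo, dif_neg (by omega : ¬ l < r)]
      omega
    | succ d ihd =>
      intro l r h1 h2 h3 h4
      by_cases hlr : l < r
      · rw [pvFindGo]
        simp only [dif_pos hlr]
        by_cases hv : i < lst.getD ((l + r) / 2) 0
        · rw [if_pos hv]
          have hmidlen : (l + r) / 2 < lst.length := by omega
          have := pvTakeWhile_char i lst hs ((l + r) / 2) hmidlen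
          apply ihd <;> omega
        · rw [if_neg hv]
          have hmidlen : (l + r) / 2 < lst.length := by omega
          have := pvTakeWhile_char i lst hs ((l + r) / 2) hmidlen
          apply ihd <;> omega
      · rw [pvFindGo, dif_neg hlr]
        omega
  exact hgo lst.length 0 lst.length (by omega) (by omega) hlen (by omega)

-- the part of the occurrence list past latest = j'-1 is the occurrence list of the dropped suffix
theorem pvOcc_dropWhile (c : Char) (t : List Char) (j j' : Nat) :
    (pvOcc c t (j : Int)).dropWhile (fun a => decide (a ≤ (j' : Int) - 1)) =
      pvOcc c (t.drop (j' - j)) ((max j j' : Nat) : Int) := by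
  induction t generalizing j with
  | nil => simp [pvOcc]
  | cons x t ih =>
    have hcast : ((j : Int) + 1) = ((j + 1 : Nat) : Int) := by push_cast; ring
    by_cases hx : x = c
    · simp only [pvOcc, if_pos hx, hcast]
      by_cases hj : j < j'
      · rw [List.dropWhile_cons_of_pos (by simp only [decide_eq_true_eq]; omega)]
        rw [ih (j + 1)]
        rw [show j' - j = (j' - (j + 1)) + 1 from by omega, List.drop_succ_cons,
            show max (j + 1) j' = max j j' from by omega]
      · rw [List.dropWhile_cons_of_neg (by simp only [decide_eq_true_eq]; omega)]
        rw [show j' - j = 0 from by omega, show max j j' = j from by omega, List.drop_zero]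
        rw [pvOcc, if_pos hx, hcast]
    · simp only [pvOcc, if_neg hx, hcast]
      rw [ih (j + 1)]
      by_cases hj : j < j'
      · rw [show j' - j = (j' - (j + 1)) + 1 from by omega, List.drop_succ_cons,
            show max (j + 1) j' = max j j' from by omega]
      · rw [show j' - (j + 1) = 0 from by omega, show j' - j = 0 from by omega,
            show max (j + 1) j' = j + 1 from by omega, show max j j' = j from by omega,
            List.drop_zero, List.drop_zero]
        rw [pvOcc, if_neg hx, hcast]

theorem pvConsume_of_occ_nil (c : Char) (u : List Char) (j : Int)
    (h : pvOcc c u j = []) : pvConsume c u = none := by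
  induction u generalizing j with
  | nil => rfl
  | cons x t ih =>
    simp only [pvOcc] at h
    split at h
    · exact absurd h (by simp)
    · simpa [pvConsume, *] using ih (j + 1) h

theorem pvConsume_of_occ_cons (c : Char) (u : List Char) (j : Nat) (k : Int) (rest : List Int)
    (h : pvOcc c u (j : Int) = k :: rest) :
    j ≤ k.toNat ∧ pvConsume c u = some (u.drop (k.toNat + 1 - j)) := by
  induction u generalizing j with
  | nil => simp [pvOcc] at h
  | cons x t ih =>
    by_cases hx : x = c
    · simp only [pvOcc, if_pos hx] at h
      obtain ⟨hk, -⟩ := List.cons_eq_cons.1 h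
      subst hk
      refine ⟨by simp, ?_⟩
      rw [pvConsume, if_pos hx]
      rw [show ((j : Int)).toNat + 1 - j = 1 from by omega]
      simp
    · simp only [pvOcc, if_neg hx] at h
      rw [show ((j : Int) + 1) = ((j + 1 : Nat) : Int) by push_cast; ring] at h
      obtain ⟨h1, h2⟩ := ih (j + 1) h
      refine ⟨by omega, ?_⟩
      rw [pvConsume, if_neg hx, h2]
      congr 1
      have : k.toNat + 1 - j = (k.toNat + 1 - (j + 1)) + 1 := by omega
      rw [this, List.drop_succ_cons]

-- counting folds: A's 'if … then count+1 else count' vs B's 'acc + (if … then 1 else 0)'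
theorem pvFold_count {α : Type} (p q : α → Bool) (hpq : ∀ w, p w = q w) :
    ∀ (ws : List α) (acc : Int),
      ws.foldl (fun c w => if p w then c + 1 else c) acc
        = ws.foldl (fun a w => a + if q w then 1 else 0) acc := by
  intro ws
  induction ws with
  | nil => intro acc; rfl
  | cons w ws ih =>
    intro acc
    simp only [List.foldl_cons]
    rw [hpq w]
    by_cases h : q w = true
    · simp only [h, if_true]
      exact ih (acc + 1)
    · simp only [h, if_false, Bool.false_eq_true]
      rw [ih acc]
      norm_num

-- the element sitting right after the ≤-prefix
theorem pvGetD_split (p : Int → Bool) :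
    ∀ (l : List Int) (k : Int) (rest : List Int), l.dropWhile p = k :: rest →
      l.getD (l.takeWhile p).length 0 = k := by
  intro l
  induction l with
  | nil => intro k rest h; simp at h
  | cons x t ih =>
    intro k rest h
    by_cases hp : p x
    · rw [List.dropWhile_cons_of_pos hp] at h
      rw [List.takeWhile_cons_of_pos hp, List.length_cons, List.getD_cons_succ]
      exact ih k rest h
    · rw [List.dropWhile_cons_of_neg hp] at h
      rw [List.takeWhile_cons_of_neg hp, List.length_nil, List.getD_cons_zero]
      exact (List.cons_eq_cons.1 h).1

-- main bridge: A's inner loop at latest = j-1 equals B's scan of the j-dropped suffix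
theorem pvMatch_eq (s : List Char) (w : List Char) (j : Nat) :
    pvMatchWord (pvBuildLookup s) w ((j : Int) - 1) = pvIsSub w (s.drop j) := by
  induction w generalizing j with
  | nil => rfl
  | cons c w ih =>
    have hocc := pvBuildLookup_getD s c
    have hdrop : (pvOcc c s 0).dropWhile (fun a => decide (a ≤ (j : Int) - 1))
        = pvOcc c (s.drop j) (j : Int) := by
      have := pvOcc_dropWhile c s 0 j
      simpa using this
    rw [pvMatchWord, pvIsSub]
    cases hg : (pvBuildLookup s).get? c with
    | none =>
      have h0 : pvOcc c s 0 = [] := by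
        rw [← hocc, PySem.Dict.getD_eq_get?_getD, hg]
        rfl
      have h1 : pvOcc c (s.drop j) (j : Int) = [] := by
        rw [← hdrop, h0]; rfl
      rw [pvConsume_of_occ_nil c _ _ h1]
    | some lst =>
      have hlst : lst = pvOcc c s 0 := by
        rw [← hocc, PySem.Dict.getD_eq_get?_getD, hg]
        rfl
      have hsort : lst.Pairwise (· ≤ ·) := hlst ▸ pvOcc_sorted c s 0
      have hfind := pvFindGo_eq lst ((j : Int) - 1) hsort
      have hsplit := List.takeWhile_append_dropWhile
        (p := fun a => decide (a ≤ (j : Int) - 1)) (l := lst)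
      have hlen := congrArg List.length hsplit
      rw [List.length_append] at hlen
      have hdw : lst.dropWhile (fun a => decide (a ≤ (j : Int) - 1))
          = pvOcc c (s.drop j) (j : Int) := by rw [hlst, hdrop]
      cases hu : pvOcc c (s.drop j) (j : Int) with
      | nil =>
        have h2 : (lst.dropWhile (fun a => decide (a ≤ (j : Int) - 1))).length = 0 := by
          rw [hdw, hu]; rfl
        have h3 : pvFindGo lst ((j : Int) - 1) 0 lst.length = lst.length := by
          rw [hfind]; omega
        rw [pvConsume_of_occ_nil c _ _ hu]
        simp [h3]
      | cons k rest =>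
        have h2 : (lst.dropWhile (fun a => decide (a ≤ (j : Int) - 1))).length
            = rest.length + 1 := by rw [hdw, hu]; rfl
        have hne : (lst.takeWhile (fun a => decide (a ≤ (j : Int) - 1))).length
            ≠ lst.length := by omega
        have hkmem : (j : Int) ≤ k :=
          pvOcc_mem_le c (s.drop j) (j : Int) k (by rw [hu]; exact List.mem_cons_self)
        obtain ⟨hjk, hcons⟩ := pvConsume_of_occ_cons c (s.drop j) j k rest hu
        have hgetD : lst.getD
            ((lst.takeWhile (fun a => decide (a ≤ (j : Int) - 1))).length) 0 = k :=
          pvGetD_split _ lst k rest (by rw [hdw, hu])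
        rw [hcons]
        simp only [hfind, if_neg hne, hgetD]
        rw [List.drop_drop, show j + (k.toNat + 1 - j) = k.toNat + 1 from by omega]
        conv_lhs => rw [show k = ((k.toNat + 1 : Nat) : Int) - 1 from by omega]
        exact ih (k.toNat + 1)

-- ===== VERDICT (by name: the statement is the Claim_ definition above) =====
theorem numMatchingSubseq_spec : Claim_equal_numMatchingSubseq := by
  intro s words _
  unfold Spec_numMatchingSubseq numMatchingSubseq numMatchingSubseq_alt
  exact pvFold_count _ _
    (fun word => by simpa using pvMatch_eq s.toList word.toList 0) words 0
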